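-- pv_equiv track=rewrite | github.com/Onarix/python-uj-2023 | zestaw_3/zad2.py | recursive_reversal
-- ===== SOURCE A (Python) =====
-- def recursive_reversal(L, left, right):
--     if left >= right:
--         return L
--     else:
--         temp = L[left]
--         L[left] = L[right]
--         L[right] = temp
--         return recursive_reversal(L, left + 1, right - 1)
-- ===== SOURCE B (Python) =====
-- def recursive_reversal(L, left, right):
--     for k in range((right - left + 1) // 2):
--         i, j = left + k, right - k
--         L[i], L[j] = L[j], L[i]
--     return L
-- ===== Notes on version B (the rewrite author's own statement) =====
-- stated objective: idiomatic
-- what changed: Replaced the tail recursion on two moving pointers with a for-loop over a precomputed swap count k in range((right-left+1)//2), swapping L[left+k] and L[right-k] by tuple assignment.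
import Mathlib
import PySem

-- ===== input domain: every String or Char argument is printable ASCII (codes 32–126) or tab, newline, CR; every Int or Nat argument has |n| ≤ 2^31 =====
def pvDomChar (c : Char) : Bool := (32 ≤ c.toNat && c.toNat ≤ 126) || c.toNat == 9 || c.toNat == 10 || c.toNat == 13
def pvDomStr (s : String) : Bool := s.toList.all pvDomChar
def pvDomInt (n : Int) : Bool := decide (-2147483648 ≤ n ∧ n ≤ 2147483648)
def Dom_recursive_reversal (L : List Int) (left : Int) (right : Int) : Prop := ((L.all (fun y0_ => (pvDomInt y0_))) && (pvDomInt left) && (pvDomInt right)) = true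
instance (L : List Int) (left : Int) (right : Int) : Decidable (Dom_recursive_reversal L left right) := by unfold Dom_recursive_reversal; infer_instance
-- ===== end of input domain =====

-- B replaces A's tail recursion on two moving pointers by a for-loop over a precomputed swap
-- count (idiomatic; same cost). Both Pythons mutate L in place identically; the equivalence
-- proved here is about the return value.

-- ===== PORT A =====
-- Literal port of A: tail recursion; pyGet?/pySetD model Python's (possibly negative) indexing;
-- a 'none' (IndexError) is excluded by Pre_, the port returns the current list there.
def recursive_reversal (L : List Int) (left : Int) (right : Int) : List Int :=
  if left ≥ right then L
  else
    match PySem.List.pyGet? L left with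
    | none => L
    | some temp =>
      match PySem.List.pyGet? L right with
      | none => L
      | some vr =>
        recursive_reversal (PySem.List.pySetD (PySem.List.pySetD L left vr) right temp)
          (left + 1) (right - 1)
termination_by (right - left).toNat
decreasing_by omega

-- ===== PORT B =====
-- Literal port of B: fold over range((right-left+1)//2); tuple swap L[i],L[j] = L[j],L[i].
def recursive_reversal_alt (L : List Int) (left : Int) (right : Int) : List Int :=
  (PySem.List.pyRange 0 (PySem.Int.floordiv (right - left + 1) 2) 1).foldl
    (fun M k =>
      let i := left + k
      let j := right - k
      match PySem.List.pyGet? M j, PySem.List.pyGet? M i with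
      | some vj, some vi => PySem.List.pySetD (PySem.List.pySetD M i vj) j vi
      | _, _ => M) L

-- ===== PRECONDITION & SPEC =====
-- Exactly the inputs where the Python A returns (no IndexError): either no swap happens,
-- or the first pair of indices is in Python's (wraparound) range — then all later ones are too.
def Pre_recursive_reversal (L : List Int) (left : Int) (right : Int) : Prop :=
  left ≥ right ∨ (-(L.length : Int) ≤ left ∧ right < (L.length : Int))
instance (L : List Int) (left : Int) (right : Int) : Decidable (Pre_recursive_reversal L left right) := by unfold Pre_recursive_reversal; infer_instance

def pvWitness_recursive_reversal : List Int × Int × Int := ([1, 2, 3, 4], 0, 3)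

def Spec_recursive_reversal (L : List Int) (left : Int) (right : Int) (out : List Int) : Prop := out = recursive_reversal_alt L left right
instance (L : List Int) (left : Int) (right : Int) (out : List Int) : Decidable (Spec_recursive_reversal L left right out) := by unfold Spec_recursive_reversal; infer_instance

-- ===== CLAIM (what is proved, stated in full; the proofs are below) =====
def Claim_equal_recursive_reversal : Prop := ∀ (L : List Int) (left : Int) (right : Int), Dom_recursive_reversal L left right → Pre_recursive_reversal L left right → Spec_recursive_reversal L left right (recursive_reversal L left right)

-- ===== LEMMAS AND PROOFS =====

-- One step of B's loop peeled off: with left < right, B on (L,left,right) is B on the swapped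
-- list with pointers moved inward.
lemma alt_step (L : List Int) (left right : Int) (h : left < right) :
    recursive_reversal_alt L left right =
      recursive_reversal_alt
        ((fun M k =>
          let i := left + k
          let j := right - k
          match PySem.List.pyGet? M j, PySem.List.pyGet? M i with
          | some vj, some vi => PySem.List.pySetD (PySem.List.pySetD M i vj) j vi
          | _, _ => M) L 0)
        (left + 1) (right - 1) := by
  unfold recursive_reversal_alt
  rw [PySem.Int.floordiv_eq_ediv_of_pos (a := right - left + 1) (by omega),
      PySem.Int.floordiv_eq_ediv_of_pos (a := right - 1 - (left + 1) + 1) (by omega)]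
  have ht : 0 < (right - left + 1) / 2 := by omega
  rw [PySem.List.pyRange_one_cons ht, List.foldl_cons,
      PySem.List.pyRange_one, PySem.List.pyRange_one]
  have hb : ((right - left + 1) / 2 - (0 + 1)).toNat
      = ((right - 1 - (left + 1) + 1) / 2 - 0).toNat := by omega
  rw [hb, List.foldl_map, List.foldl_map]
  congr 1
  funext M k
  have e1 : left + (0 + 1 + (k : Int)) = left + 1 + (0 + (k : Int)) := by ring
  have e2 : right - (0 + 1 + (k : Int)) = right - 1 - (0 + (k : Int)) := by ring
  simp only [e1, e2]

theorem recursive_reversal_spec : Claim_equal_recursive_reversal := by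
  unfold Claim_equal_recursive_reversal
  intro L left right _ hpre
  unfold Spec_recursive_reversal
  -- strong induction on the gap (right - left)
  suffices h : ∀ (m : Nat) (L : List Int) (left right : Int),
      (right - left).toNat = m → Pre_recursive_reversal L left right →
      recursive_reversal L left right = recursive_reversal_alt L left right by
    exact h (right - left).toNat L left right rfl hpre
  intro m
  induction m using Nat.strong_induction_on with
  | _ m ih =>
    intro L left right hm hpre
    by_cases hlr : left ≥ right
    · -- base: no swap on either side
      rw [recursive_reversal.eq_def]
      unfold recursive_reversal_alt
      rw [if_pos hlr, PySem.Int.floordiv_eq_ediv_of_pos (by omega),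
          PySem.List.pyRange_one_eq_nil (by omega)]
      rfl
    · rw [not_le] at hlr
      have hn : -(L.length : Int) ≤ left ∧ right < (L.length : Int) := by
        rcases hpre with h | h
        · omega
        · exact h
      obtain ⟨vl, hvl⟩ : ∃ v, PySem.List.pyGet? L left = some v := by
        rcases he : PySem.List.pyGet? L left with _ | v
        · rw [PySem.List.pyGet?_eq_none_iff] at he
          exact absurd ⟨by omega, by omega⟩ he
        · exact ⟨v, rfl⟩
      obtain ⟨vr, hvr⟩ : ∃ v, PySem.List.pyGet? L right = some v := by
        rcases he : PySem.List.pyGet? L right with _ | v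
        · rw [PySem.List.pyGet?_eq_none_iff] at he
          exact absurd ⟨by omega, by omega⟩ he
        · exact ⟨v, rfl⟩
      have hlen : (PySem.List.pySetD (PySem.List.pySetD L left vr) right vl).length
          = L.length := by
        simp [PySem.List.length_pySetD]
      -- unfold one step of A
      have hA : recursive_reversal L left right
          = recursive_reversal (PySem.List.pySetD (PySem.List.pySetD L left vr) right vl)
              (left + 1) (right - 1) := by
        rw [recursive_reversal.eq_def]
        rw [if_neg (by omega), hvl, hvr]
      -- one step of B
      have hB : recursive_reversal_alt L left right
          = recursive_reversal_alt (PySem.List.pySetD (PySem.List.pySetD L left vr) right vl)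
              (left + 1) (right - 1) := by
        rw [alt_step L left right hlr]
        simp only [add_zero, sub_zero, hvl, hvr]
      rw [hA, hB]
      exact ih (right - 1 - (left + 1)).toNat (by omega) _ (left + 1) (right - 1) rfl
        (Or.inr ⟨by omega, by omega⟩)
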